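-- pv_equiv track=rewrite | github.com/JokaNeves/School_Python | ficha8E.py | maiuscula
-- ===== SOURCE A (Python) =====
-- def maiuscula(c):
--     letras_minusculas = "abcdefghijklmnopqrstuvwxyz"
--     letras_maiusculas = "ABCDEFGHIJKLMNOPQRSTUVWXYZ"
--     i = 0
--     while i < 26:
--         if c == letras_minusculas[i]:
--             return letras_maiusculas[i]
--         i += 1
--     i = 0
--     while i < 26:
--         if c == letras_maiusculas[i]:
--             return c
--         i += 1
--     return '*'
-- ===== SOURCE B (Python) =====
-- def maiuscula(c):
--     # Arithmetic closed form over character codes instead of scanning alphabet strings.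
--     if isinstance(c, str) and len(c) == 1:
--         if 'a' <= c <= 'z':
--             return chr(ord(c) - 32)
--         if 'A' <= c <= 'Z':
--             return c
--     return '*'
-- ===== Notes on version B (the rewrite author's own statement) =====
-- stated objective: idiomatic
-- what changed: Replaces the two 26-step alphabet-scanning while loops with a constant-time arithmetic closed form on character codes (chr(ord(c)-32) for lowercase, identity for uppercase, '*' otherwise).
import Mathlib
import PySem

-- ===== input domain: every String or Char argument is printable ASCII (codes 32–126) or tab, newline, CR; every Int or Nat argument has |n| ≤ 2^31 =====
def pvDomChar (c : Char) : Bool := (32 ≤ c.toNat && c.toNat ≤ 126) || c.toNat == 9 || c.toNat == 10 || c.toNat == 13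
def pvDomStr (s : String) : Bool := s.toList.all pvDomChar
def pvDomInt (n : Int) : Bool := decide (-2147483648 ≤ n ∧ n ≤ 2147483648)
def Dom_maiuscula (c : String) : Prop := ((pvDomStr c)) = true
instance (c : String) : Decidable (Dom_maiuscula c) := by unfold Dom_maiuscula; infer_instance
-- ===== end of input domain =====

-- B replaces A's two 26-step alphabet-scanning while loops with an arithmetic closed form on character codes (idiomatic; same return value everywhere).

-- ===== PORT A =====
-- the fixed alphabet strings of A
def pvLows : List Char := "abcdefghijklmnopqrstuvwxyz".toList
def pvUps : List Char := "ABCDEFGHIJKLMNOPQRSTUVWXYZ".toList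

-- first while loop: scan letras_minusculas, return the matching uppercase letter
def pvLoopLow (c : String) (i : Nat) : Option String :=
  if i < 26 then
    if c = String.ofList [pvLows[i]!] then some (String.ofList [pvUps[i]!])
    else pvLoopLow c (i + 1)
  else none
termination_by 26 - i

-- second while loop: scan letras_maiusculas, return c unchanged on a match
def pvLoopUp (c : String) (i : Nat) : Option String :=
  if i < 26 then
    if c = String.ofList [pvUps[i]!] then some c
    else pvLoopUp c (i + 1)
  else none
termination_by 26 - i

def maiuscula (c : String) : String :=
  match pvLoopLow c 0 with
  | some r => r
  | none =>
    match pvLoopUp c 0 with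
    | some r => r
    | none => "*"

-- ===== PORT B =====
def maiuscula_alt (c : String) : String :=
  match c.toList with
  | [ch] =>
    if 'a' ≤ ch ∧ ch ≤ 'z' then String.ofList [Char.ofNat (ch.toNat - 32)]
    else if 'A' ≤ ch ∧ ch ≤ 'Z' then c
    else "*"
  | _ => "*"

-- ===== PRECONDITION & SPEC =====
def Spec_maiuscula (c : String) (out : String) : Prop := out = maiuscula_alt c
instance (c : String) (out : String) : Decidable (Spec_maiuscula c out) := by unfold Spec_maiuscula; infer_instance

-- ===== CLAIM (what is proved, stated in full; the proofs are below) =====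
def Claim_equal_maiuscula : Prop := ∀ (c : String), Dom_maiuscula c → Spec_maiuscula c (maiuscula c)

-- ===== LEMMAS AND PROOFS =====

theorem pv_str_eq_iff (s : String) (l : List Char) : s = String.ofList l ↔ s.toList = l := by
  constructor
  · rintro rfl; simp
  · intro h; apply String.toList_injective; simpa using h

theorem pv_char_eq_of_toNat {a b : Char} (h : a.toNat = b.toNat) : a = b := by
  have := congrArg Char.ofNat h
  rwa [Char.ofNat_toNat, Char.ofNat_toNat] at this

theorem pv_char_le_toNat {a b : Char} (h : a ≤ b) : a.toNat ≤ b.toNat :=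
  UInt32.le_iff_toNat_le.mp (Char.le_def.mp h)

theorem pv_char_le_of_toNat {a b : Char} (h : a.toNat ≤ b.toNat) : a ≤ b :=
  Char.le_def.mpr (UInt32.le_iff_toNat_le.mpr h)

theorem pv_lowNoneAux (c : String) : ∀ n i, 26 - i = n →
    (∀ j, i ≤ j → j < 26 → c ≠ String.ofList [pvLows[j]!]) → pvLoopLow c i = none := by
  intro n
  induction n with
  | zero =>
    intro i hn _
    rw [pvLoopLow]
    simp [show ¬ i < 26 by omega]
  | succ n ih =>
    intro i hn hnm
    have hi : i < 26 := by omega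
    rw [pvLoopLow]
    simp only [hi, if_true, if_neg (hnm i le_rfl hi)]
    exact ih (i + 1) (by omega) (fun j hj hj2 => hnm j (by omega) hj2)

theorem pv_lowSomeAux (c : String) : ∀ n i k, k - i = n → i ≤ k → k < 26 →
    c = String.ofList [pvLows[k]!] →
    (∀ j, i ≤ j → j < k → c ≠ String.ofList [pvLows[j]!]) →
    pvLoopLow c i = some (String.ofList [pvUps[k]!]) := by
  intro n
  induction n with
  | zero =>
    intro i k hn hik hk hc _
    have : i = k := by omega
    subst this
    rw [pvLoopLow]
    simp [show i < 26 by omega, hc]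
  | succ n ih =>
    intro i k hn hik hk hc hnm
    have hi : i < 26 := by omega
    rw [pvLoopLow]
    simp only [hi, if_true, if_neg (hnm i le_rfl (by omega))]
    exact ih (i + 1) k (by omega) (by omega) hk hc (fun j hj hjk => hnm j (by omega) hjk)

theorem pv_upNoneAux (c : String) : ∀ n i, 26 - i = n →
    (∀ j, i ≤ j → j < 26 → c ≠ String.ofList [pvUps[j]!]) → pvLoopUp c i = none := by
  intro n
  induction n with
  | zero =>
    intro i hn _
    rw [pvLoopUp]
    simp [show ¬ i < 26 by omega]
  | succ n ih =>
    intro i hn hnm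
    have hi : i < 26 := by omega
    rw [pvLoopUp]
    simp only [hi, if_true, if_neg (hnm i le_rfl hi)]
    exact ih (i + 1) (by omega) (fun j hj hj2 => hnm j (by omega) hj2)

theorem pv_upSomeAux (c : String) : ∀ n i k, k - i = n → i ≤ k → k < 26 →
    c = String.ofList [pvUps[k]!] →
    (∀ j, i ≤ j → j < k → c ≠ String.ofList [pvUps[j]!]) →
    pvLoopUp c i = some c := by
  intro n
  induction n with
  | zero =>
    intro i k hn hik hk hc _
    have : i = k := by omega
    subst this
    rw [pvLoopUp]
    simp [show i < 26 by omega, hc]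
  | succ n ih =>
    intro i k hn hik hk hc hnm
    have hi : i < 26 := by omega
    rw [pvLoopUp]
    simp only [hi, if_true, if_neg (hnm i le_rfl (by omega))]
    exact ih (i + 1) k (by omega) (by omega) hk hc (fun j hj hjk => hnm j (by omega) hjk)

theorem pv_lowsNat : ∀ j, j < 26 → (pvLows[j]!).toNat = 97 + j := by decide
theorem pv_upsNat : ∀ j, j < 26 → (pvUps[j]!).toNat = 65 + j := by decide

theorem pv_main (c : String) : maiuscula c = maiuscula_alt c := by
  unfold maiuscula maiuscula_alt
  rcases hc : c.toList with _ | ⟨ch, _ | ⟨ch2, tl⟩⟩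
  · -- empty string: every single-char comparison fails
    have hnone : ∀ l : Char, c ≠ String.ofList [l] := by
      intro l h; rw [pv_str_eq_iff, hc] at h; simp at h
    rw [pv_lowNoneAux c 26 0 rfl (fun j _ _ => hnone _),
        pv_upNoneAux c 26 0 rfl (fun j _ _ => hnone _)]
  · -- single character
    have hch : c.toList = [ch] := hc
    by_cases hl : 'a' ≤ ch ∧ ch ≤ 'z'
    · have h1 : 97 ≤ ch.toNat := pv_char_le_toNat hl.1
      have h2 : ch.toNat ≤ 122 := pv_char_le_toNat hl.2
      have hk : ch.toNat - 97 < 26 := by omega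
      have hchl : ch = pvLows[ch.toNat - 97]! :=
        pv_char_eq_of_toNat (by rw [pv_lowsNat _ hk]; omega)
      have hceq : c = String.ofList [pvLows[ch.toNat - 97]!] := by
        rw [pv_str_eq_iff, hch, ← hchl]
      rw [pv_lowSomeAux c (ch.toNat - 97) 0 (ch.toNat - 97) rfl (by omega) hk hceq ?_]
      · simp only [if_pos hl]
        congr 1
        simp only [List.cons.injEq, and_true]
        apply pv_char_eq_of_toNat
        have harg : ch.toNat - 32 = 65 + (ch.toNat - 97) := by omega
        have hv : ∀ k, k < 26 → (Char.ofNat (65 + k)).toNat = 65 + k := by decide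
        rw [pv_upsNat _ hk, harg, hv _ hk]
      · intro j _ hjk h
        rw [pv_str_eq_iff, hch] at h
        have := congrArg Char.toNat (List.cons.injEq .. ▸ h).1
        rw [pv_lowsNat j (by omega)] at this
        omega
    · have hlowNone : pvLoopLow c 0 = none := by
        apply pv_lowNoneAux c 26 0 rfl
        intro j _ hj h
        rw [pv_str_eq_iff, hch] at h
        have := congrArg Char.toNat (List.cons.injEq .. ▸ h).1
        rw [pv_lowsNat j hj] at this
        apply hl
        have ha : ('a' : Char).toNat = 97 := by decide
        have hz : ('z' : Char).toNat = 122 := by decide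
        exact ⟨pv_char_le_of_toNat (by omega), pv_char_le_of_toNat (by omega)⟩
      rw [hlowNone]
      by_cases hu : 'A' ≤ ch ∧ ch ≤ 'Z'
      · have h1 : 65 ≤ ch.toNat := pv_char_le_toNat hu.1
        have h2 : ch.toNat ≤ 90 := pv_char_le_toNat hu.2
        have hk : ch.toNat - 65 < 26 := by omega
        have hchu : ch = pvUps[ch.toNat - 65]! :=
          pv_char_eq_of_toNat (by rw [pv_upsNat _ hk]; omega)
        have hceq : c = String.ofList [pvUps[ch.toNat - 65]!] := by
          rw [pv_str_eq_iff, hch, ← hchu]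
        rw [pv_upSomeAux c (ch.toNat - 65) 0 (ch.toNat - 65) rfl (by omega) hk hceq ?_]
        · simp [hl, hu]
        · intro j _ hjk h
          rw [pv_str_eq_iff, hch] at h
          have := congrArg Char.toNat (List.cons.injEq .. ▸ h).1
          rw [pv_upsNat j (by omega)] at this
          omega
      · have hupNone : pvLoopUp c 0 = none := by
          apply pv_upNoneAux c 26 0 rfl
          intro j _ hj h
          rw [pv_str_eq_iff, hch] at h
          have := congrArg Char.toNat (List.cons.injEq .. ▸ h).1
          rw [pv_upsNat j hj] at this
          apply hu
          have ha : ('A' : Char).toNat = 65 := by decide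
          have hz : ('Z' : Char).toNat = 90 := by decide
          exact ⟨pv_char_le_of_toNat (by omega), pv_char_le_of_toNat (by omega)⟩
        rw [hupNone]
        simp [hl, hu]
  · -- length ≥ 2: every single-char comparison fails
    have hnone : ∀ l : Char, c ≠ String.ofList [l] := by
      intro l h; rw [pv_str_eq_iff, hc] at h; simp at h
    rw [pv_lowNoneAux c 26 0 rfl (fun j _ _ => hnone _),
        pv_upNoneAux c 26 0 rfl (fun j _ _ => hnone _)]

-- ===== VERDICT (by name: the statement is the Claim_ definition above) =====
theorem maiuscula_spec : Claim_equal_maiuscula := by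
  intro c _
  unfold Spec_maiuscula
  exact pv_main c
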